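-- pv_equiv track=rewrite | github.com/Breakend/SelfDestructingModels | data.py | remove_pronouns_from_bio
-- ===== SOURCE A (Python) =====
-- def remove_pronouns_from_bio(bio):
--     # base tokens we want to replace
--     replace_map = {
--         "She": "They",
--         "He": "They",
--         "Her": "Their",
--         "Him": "Their",
--         "His": "Their",
--     }
--
--     # transformed versions of the keys above that we want to match
--     transforms = [lambda x: x, lambda x: x + ".", lambda x: x + ",", lambda x: x.lower()]
--
--     # simple tokenization by whitespace
--     bio_tokens = [token.strip() for token in bio.split(" ")]
--
--     for idx in range(len(bio_tokens)):
--         for t in transforms: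
--             for k in replace_map.keys():
--                 if bio_tokens[idx] == t(k):
--                     bio_tokens[idx] = t(replace_map[k])
--
--     return " ".join(bio_tokens)
-- ===== SOURCE B (Python) =====
-- def remove_pronouns_from_bio(bio):
--     caps = {"She": "They", "He": "They", "Her": "Their", "Him": "Their", "His": "Their"}
--     low = {k.lower(): v.lower() for k, v in caps.items()}
--
--     def fix(token):
--         tok = token.strip()
--         # peel one trailing period or comma and replace the stem, re-attaching the punctuation
--         if tok and tok[-1] in ".,":
--             stem = tok[:-1]
--             if stem in caps:
--                 return caps[stem] + tok[-1]
--             return tok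
--         if tok in caps:
--             return caps[tok]
--         return low.get(tok, tok)
--
--     return " ".join(fix(token) for token in bio.split(" "))
-- ===== Notes on version B (the rewrite author's own statement) =====
-- stated objective: alternative
-- what changed: Instead of testing every token against all 20 transform(key) candidates, B parses each token's structure: it peels one trailing period or comma and looks the stem up in the 5-entry capitalized map (re-attaching the punctuation), otherwise tries the capitalized map and then the lowercase map; correct because A's punctuation transforms apply only to capitalized keys, the lowercase transform only to bare keys, and no replacement re-matches a key.
import Mathlib
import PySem

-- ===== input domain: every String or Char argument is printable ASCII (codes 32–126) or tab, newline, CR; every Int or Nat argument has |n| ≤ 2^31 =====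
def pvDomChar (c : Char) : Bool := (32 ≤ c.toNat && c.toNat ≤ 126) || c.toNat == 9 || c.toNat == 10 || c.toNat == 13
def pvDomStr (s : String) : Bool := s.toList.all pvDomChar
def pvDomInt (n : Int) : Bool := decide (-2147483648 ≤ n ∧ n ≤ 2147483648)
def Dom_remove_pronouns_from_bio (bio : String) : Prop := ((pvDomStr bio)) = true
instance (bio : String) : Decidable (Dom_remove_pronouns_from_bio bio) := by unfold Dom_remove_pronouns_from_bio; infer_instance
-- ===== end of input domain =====

-- B parses each token's structure (peel one trailing period or comma and look the stem up in the 5-entry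
-- capitalized map, else try the capitalized then the lowercase map) instead of A's per-token scan
-- over all 20 transform(key) candidates.


-- ===== PORT A =====
-- replace_map, in insertion order
def pvReplaceMapA : List (String × String) :=
  [("She", "They"), ("He", "They"), ("Her", "Their"), ("Him", "Their"), ("His", "Their")]

-- the four transforms, in order
def pvTransformsA : List (String → String) :=
  [fun x => x, fun x => x ++ ".", fun x => x ++ ",", fun x => PySem.Str.lower x]

def remove_pronouns_from_bio (bio : String) : String :=
  let bio_tokens := ((PySem.Str.split? bio " ").getD []).map (fun token => PySem.Str.strip token)
  -- 'for idx … : for t … : for k … : if bio_tokens[idx] == t(k): bio_tokens[idx] = t(replace_map[k])'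
  -- (each index is only read/written at itself, so the index loop is a map; the inner loops fold over
  -- the transforms and the dict keys in order, threading the current token value)
  let bio_tokens := bio_tokens.map (fun tok =>
    pvTransformsA.foldl (fun tok t =>
      pvReplaceMapA.foldl (fun tok kv =>
        if tok = t kv.1 then t kv.2 else tok) tok) tok)
  PySem.Str.join " " bio_tokens

-- ===== PORT B =====
-- caps = {"She": "They", …}
def pvCapsB : PySem.Dict String String :=
  PySem.Dict.mk [("She", "They"), ("He", "They"), ("Her", "Their"), ("Him", "Their"), ("His", "Their")]

-- low = {k.lower(): v.lower() for k, v in caps.items()}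
def pvLowB : PySem.Dict String String :=
  pvCapsB.items.foldl (fun d kv => d.insert (PySem.Str.lower kv.1) (PySem.Str.lower kv.2)) PySem.Dict.empty

-- 'if tok in caps: return caps[tok]; return low.get(tok, tok)' (the fall-through of fix)
def pvNoPunctB (tok : String) : String :=
  match pvCapsB.get? tok with
  | some r => r
  | none => pvLowB.getD tok tok

-- fix(token) after the strip: peel one trailing '.'/',' and replace the stem
def pvFixCoreB (tok : String) : String :=
  match PySem.Str.pyGet? tok (-1) with
  | some c =>
      if c == '.' || c == ',' then
        match pvCapsB.get? (PySem.Str.slice tok none (some (-1))) with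
        | some r => r ++ String.ofList [c]   -- caps[stem] + tok[-1]
        | none => tok
      else pvNoPunctB tok
  | none => pvNoPunctB tok               -- tok == "" : 'if tok and …' is false

def remove_pronouns_from_bio_alt (bio : String) : String :=
  PySem.Str.join " "
    (((PySem.Str.split? bio " ").getD []).map (fun token => pvFixCoreB (PySem.Str.strip token)))

-- ===== PRECONDITION & SPEC =====
def Spec_remove_pronouns_from_bio (bio : String) (out : String) : Prop := out = remove_pronouns_from_bio_alt bio
instance (bio : String) (out : String) : Decidable (Spec_remove_pronouns_from_bio bio out) := by unfold Spec_remove_pronouns_from_bio; infer_instance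

-- ===== CLAIM (what is proved, stated in full; the proofs are below) =====
def Claim_equal_remove_pronouns_from_bio : Prop := ∀ (bio : String), Dom_remove_pronouns_from_bio bio → Spec_remove_pronouns_from_bio bio (remove_pronouns_from_bio bio)

-- ===== LEMMAS AND PROOFS =====

-- a successful tok[-1] splits the list into dropLast ++ [last]
theorem pv_pyGet_neg_one (l : List Char) (c : Char) (h : PySem.List.pyGet? l (-1) = some c) :
    l = l.dropLast ++ [c] := by
  rcases l.eq_nil_or_concat with rfl | ⟨l', c', rfl⟩
  · simp [PySem.List.pyGet?, PySem.List.pyIdx?] at h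
  · have : c' = c := by
      simpa [PySem.List.pyGet?, PySem.List.pyIdx?] using h
    simp [this]

-- per-token: A's nested scan equals B's structural parse
theorem pv_step_eq (s : String) :
    pvTransformsA.foldl (fun tok t =>
      pvReplaceMapA.foldl (fun tok kv =>
        if tok = t kv.1 then t kv.2 else tok) tok) s = pvFixCoreB s := by
  by_cases h1 : s = "She";   · subst h1; decide
  by_cases h2 : s = "He";    · subst h2; decide
  by_cases h3 : s = "Her";   · subst h3; decide
  by_cases h4 : s = "Him";   · subst h4; decide
  by_cases h5 : s = "His";   · subst h5; decide
  by_cases h6 : s = "She.";  · subst h6; decide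
  by_cases h7 : s = "He.";   · subst h7; decide
  by_cases h8 : s = "Her.";  · subst h8; decide
  by_cases h9 : s = "Him.";  · subst h9; decide
  by_cases h10 : s = "His."; · subst h10; decide
  by_cases h11 : s = "She,"; · subst h11; decide
  by_cases h12 : s = "He,";  · subst h12; decide
  by_cases h13 : s = "Her,"; · subst h13; decide
  by_cases h14 : s = "Him,"; · subst h14; decide
  by_cases h15 : s = "His,"; · subst h15; decide
  by_cases h16 : s = "she";  · subst h16; decide
  by_cases h17 : s = "he";   · subst h17; decide
  by_cases h18 : s = "her";  · subst h18; decide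
  by_cases h19 : s = "him";  · subst h19; decide
  by_cases h20 : s = "his";  · subst h20; decide
  -- generic token: both sides leave it unchanged
  have hA :
      pvTransformsA.foldl (fun tok t =>
        pvReplaceMapA.foldl (fun tok kv =>
          if tok = t kv.1 then t kv.2 else tok) tok) s = s := by
    have e1 : PySem.Str.lower "She" = "she" := by decide
    have e2 : PySem.Str.lower "He" = "he" := by decide
    have e3 : PySem.Str.lower "Her" = "her" := by decide
    have e4 : PySem.Str.lower "Him" = "him" := by decide
    have e5 : PySem.Str.lower "His" = "his" := by decide
    simp [pvTransformsA, pvReplaceMapA, e1, e2, e3, e4, e5,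
          h1, h2, h3, h4, h5, h6, h7, h8, h9, h10,
          h11, h12, h13, h14, h15, h16, h17, h18, h19, h20]
  have hCaps : pvCapsB.get? s = none := by
    have g1 : ("She" == s) = false := by simp; exact fun e => h1 e.symm
    have g2 : ("He" == s) = false := by simp; exact fun e => h2 e.symm
    have g3 : ("Her" == s) = false := by simp; exact fun e => h3 e.symm
    have g4 : ("Him" == s) = false := by simp; exact fun e => h4 e.symm
    have g5 : ("His" == s) = false := by simp; exact fun e => h5 e.symm
    simp [pvCapsB, g1, g2, g3, g4, g5, PySem.Dict.get?]
  have hNoPunct : pvNoPunctB s = s := by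
    have hl : pvLowB = PySem.Dict.mk
        [("she", "they"), ("he", "they"), ("her", "their"), ("him", "their"), ("his", "their")] := by
      decide
    unfold pvNoPunctB
    rw [hCaps]
    have g16 : ("she" == s) = false := by simp; exact fun e => h16 e.symm
    have g17 : ("he" == s) = false := by simp; exact fun e => h17 e.symm
    have g18 : ("her" == s) = false := by simp; exact fun e => h18 e.symm
    have g19 : ("him" == s) = false := by simp; exact fun e => h19 e.symm
    have g20 : ("his" == s) = false := by simp; exact fun e => h20 e.symm
    simp [hl, PySem.Dict.getD, g16, g17, g18, g19, g20, PySem.Dict.get?]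
  rw [hA]
  unfold pvFixCoreB
  cases hg : PySem.Str.pyGet? s (-1) with
  | none => exact hNoPunct.symm
  | some c =>
    by_cases hc : (c == '.' || c == ',') = true
    · -- the stem cannot be a capitalized key, else s would be one of the ten punctuated cases
      have hgl : PySem.List.pyGet? s.toList (-1) = some c := by
        simpa using hg
      have hsplit : s.toList = s.toList.dropLast ++ [c] := pv_pyGet_neg_one _ _ hgl
      have hstem : (PySem.Str.slice s none (some (-1))).toList = s.toList.dropLast := by
        simpa using PySem.Str.slice_to_neg_one s
      have hcpunct : c = '.' ∨ c = ',' := by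
        rcases Bool.or_eq_true_iff.mp hc with h | h
        · exact Or.inl (by exact beq_iff_eq.mp h)
        · exact Or.inr (by exact beq_iff_eq.mp h)
      have hne : ∀ (k : String) (sd : String) (sc : String),
          sd.toList = k.toList ++ ['.'] → sc.toList = k.toList ++ [','] →
          s ≠ sd → s ≠ sc →
          (PySem.Str.slice s none (some (-1))) ≠ k := by
        intro k sd sc hd hcm hnd hnc heq
        have hstem' : s.toList.dropLast = k.toList := by rw [← hstem, heq]
        rcases hcpunct with rfl | rfl
        · exact hnd (String.toList_inj.mp (by rw [hsplit, hstem', ← hd]))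
        · exact hnc (String.toList_inj.mp (by rw [hsplit, hstem', ← hcm]))
      have n1 := hne "She" "She." "She," (by decide) (by decide) h6 h11
      have n2 := hne "He" "He." "He," (by decide) (by decide) h7 h12
      have n3 := hne "Her" "Her." "Her," (by decide) (by decide) h8 h13
      have n4 := hne "Him" "Him." "Him," (by decide) (by decide) h9 h14
      have n5 := hne "His" "His." "His," (by decide) (by decide) h10 h15
      have hnoneStem : pvCapsB.get? (PySem.Str.slice s none (some (-1))) = none := by
        have g1 : ("She" == PySem.Str.slice s none (some (-1))) = false := by
          simp; exact fun e => n1 e.symm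
        have g2 : ("He" == PySem.Str.slice s none (some (-1))) = false := by
          simp; exact fun e => n2 e.symm
        have g3 : ("Her" == PySem.Str.slice s none (some (-1))) = false := by
          simp; exact fun e => n3 e.symm
        have g4 : ("Him" == PySem.Str.slice s none (some (-1))) = false := by
          simp; exact fun e => n4 e.symm
        have g5 : ("His" == PySem.Str.slice s none (some (-1))) = false := by
          simp; exact fun e => n5 e.symm
        simp [pvCapsB, g1, g2, g3, g4, g5, PySem.Dict.get?]
      simp [hc, hnoneStem]
    · simp only [Bool.not_eq_true] at hc
      simp [hc, hNoPunct]

-- ===== VERDICT (by name: the statement is the Claim_ definition above) =====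
set_option maxHeartbeats 1000000 in
theorem remove_pronouns_from_bio_spec : Claim_equal_remove_pronouns_from_bio := by
  intro bio _
  show _ = _
  rw [remove_pronouns_from_bio, remove_pronouns_from_bio_alt]
  simp only [List.map_map, Function.comp_def, pv_step_eq]
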